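-- pv_equiv track=rewrite | github.com/AdamZhouSE/pythonHomework | Code/CodeRecords/2535/61053/297019.py | divideBlock
-- ===== SOURCE A (Python) =====
-- def divideBlock(numlst):
--     count = 0
--     maxval = numlst[0]
--     for i in range(len(numlst)):
--         if numlst[i] > maxval:
--             maxval = numlst[i]
--         if maxval == i:
--             count += 1
--
--     return count
-- ===== SOURCE B (Python) =====
-- def divideBlock(numlst):
--     # Different algorithm: extract the left-to-right maxima ("records").  The prefix
--     # maximum is constant on each record's reign interval [p, q) (q = next record's
--     # position, or len), so the answer is the number of records (v, p) with p <= v < q.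
--     records = []
--     for i, x in enumerate(numlst):
--         if not records or x > records[-1][0]:
--             records.append((x, i))
--     ends = [p for _, p in records[1:]] + [len(numlst)]
--     count = 0
--     for (v, p), q in zip(records, ends):
--         if p <= v < q:
--             count += 1
--     return count
-- ===== Notes on version B (the rewrite author's own statement) =====
-- stated objective: alternative
-- what changed: A counts per index while maintaining a running maximum; B instead extracts the left-to-right maxima (record values with their positions), pairs each record with the start of the next one, and counts the records whose value lies inside their reign interval [p, q) - no per-index equality test at all.
import Mathlib
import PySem

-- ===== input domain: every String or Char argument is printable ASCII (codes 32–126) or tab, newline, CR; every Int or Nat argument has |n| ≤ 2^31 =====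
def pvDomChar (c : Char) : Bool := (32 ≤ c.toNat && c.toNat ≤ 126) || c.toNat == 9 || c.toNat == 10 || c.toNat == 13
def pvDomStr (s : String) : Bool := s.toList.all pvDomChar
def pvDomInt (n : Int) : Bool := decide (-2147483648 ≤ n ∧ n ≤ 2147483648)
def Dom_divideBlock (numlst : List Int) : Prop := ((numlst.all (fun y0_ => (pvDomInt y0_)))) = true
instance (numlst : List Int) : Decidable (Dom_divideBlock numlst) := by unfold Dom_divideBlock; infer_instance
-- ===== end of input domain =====

-- B replaces A's per-index running-max count by a records algorithm (left-to-right maxima paired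
-- with their reign intervals); return-value equivalence on nonempty lists (alternative, same cost).

-- ===== PORT A =====
def divideBlock (numlst : List Int) : Int :=
  let maxval0 : Int := PySem.List.pyGetD numlst 0 0      -- numlst[0]; Pre_ excludes [] where Python raises IndexError
  let r := (PySem.List.pyRange 0 (numlst.length : Int) 1).foldl
    (fun (s : Int × Int) i =>
      let x := PySem.List.pyGetD numlst i 0
      let m := if x > s.2 then x else s.2
      ((if m == i then s.1 + 1 else s.1), m)) (0, maxval0)
  r.1

-- ===== PORT B =====
def divideBlock_alt (numlst : List Int) : Int :=
  let records := (PySem.List.enumerate numlst 0).foldl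
    (fun (rs : List (Int × Int)) p =>
      match rs.getLast? with
      | none => rs ++ [(p.2, p.1)]
      | some l => if p.2 > l.1 then rs ++ [(p.2, p.1)] else rs) []
  let ends := (records.drop 1).map (fun r => r.2) ++ [(numlst.length : Int)]
  (records.zip ends).foldl
    (fun (c : Int) pq => if pq.1.2 ≤ pq.1.1 ∧ pq.1.1 < pq.2 then c + 1 else c) 0

-- ===== PRECONDITION & SPEC =====
-- Pre_ excludes only the empty list, on which Python A raises IndexError at its first-element read.
def Pre_divideBlock (numlst : List Int) : Prop := numlst ≠ []
instance (numlst : List Int) : Decidable (Pre_divideBlock numlst) := by unfold Pre_divideBlock; infer_instance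
def pvWitness_divideBlock : List Int := ([0, 2, 1, 3])

def Spec_divideBlock (numlst : List Int) (out : Int) : Prop := out = divideBlock_alt numlst
instance (numlst : List Int) (out : Int) : Decidable (Spec_divideBlock numlst out) := by unfold Spec_divideBlock; infer_instance

-- ===== CLAIM (what is proved, stated in full; the proofs are below) =====
def Claim_equal_divideBlock : Prop := ∀ (numlst : List Int), Dom_divideBlock numlst → Pre_divideBlock numlst → Spec_divideBlock numlst (divideBlock numlst)

-- ===== LEMMAS AND PROOFS =====

-- A-side recursive view: count of indices where the running max equals the index
def pvFA : List Int → Int → Int → Int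
  | [], _, _ => 0
  | x :: t, i, m => (if max m x = i then 1 else 0) + pvFA t (i + 1) (max m x)

-- B-side recursive view: records (left-to-right strict maxima) of the enumerated tail,
-- given current maximum m; stored as (value, position)
def pvRecs (m : Int) : List (Int × Int) → List (Int × Int)
  | [] => []
  | (i, x) :: t => if x > m then (x, i) :: pvRecs x t else pvRecs m t

-- B-side recursive view of the counting pass: each record's reign ends at the next record's
-- position (or n); count records whose value lies in their reign interval
def pvCnt : List (Int × Int) → Int → Int
  | [], _ => 0
  | (v, p) :: rest, n =>
    (if p ≤ v ∧ v < (match rest with | [] => n | (_, p2) :: _ => p2) then 1 else 0) + pvCnt rest n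

-- A's index loop over pyRange as a loop over enumerate, reading successive elements
lemma pvRangeFold (f : Int × Int → Int → Int → Int × Int) (L : List Int) :
    ∀ (xs : List Int) (a : Nat), L.drop a = xs → ∀ s,
    (PySem.List.pyRange (a : Int) ((a : Int) + xs.length) 1).foldl
        (fun s i => f s i (PySem.List.pyGetD L i 0)) s
      = (PySem.List.enumerate xs (a : Int)).foldl (fun s p => f s p.1 p.2) s := by
  intro xs
  induction xs with
  | nil => intro a _ s; simp [PySem.List.pyRange_one_eq_nil, PySem.List.enumerate_nil]
  | cons x t ih =>
    intro a hdrop s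
    have hget : L[a]? = some x := by
      have := List.getElem?_drop (xs := L) (i := a) (j := 0)
      simp [hdrop] at this
      simpa using this.symm
    rw [PySem.List.pyRange_one_cons (by simp)]
    rw [PySem.List.enumerate_cons]
    simp only [List.foldl_cons]
    have hx : PySem.List.pyGetD L (a : Int) 0 = x := by
      rw [PySem.List.pyGetD_natCast]
      simp [List.getD, hget]
    rw [hx]
    have hstep : ((a : Int) + 1) = ((a + 1 : Nat) : Int) := by push_cast; ring
    have hlen' : (a : Int) + ((x :: t).length : Int) = ((a + 1 : Nat) : Int) + (t.length : Int) := by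
      simp only [List.length_cons]; push_cast; omega
    rw [hlen', hstep]
    exact ih (a + 1) (by rw [← List.drop_drop]; simp [hdrop]) _

-- x > m written as in the ports; B's max
lemma pvIteMax (x m : Int) : (if x > m then x else m) = max m x := by
  rcases le_total x m with h | h
  · simp [max_eq_left h, not_lt.mpr h]
  · rcases eq_or_lt_of_le h with h2 | h2
    · simp [h2]
    · simp [max_eq_right h, h2]

-- A's fused fold computes pvFA
lemma pvFoldFA : ∀ (t : List Int) (i : Int) (m c : Int),
    ((PySem.List.enumerate t i).foldl
      (fun (s : Int × Int) (p : Int × Int) =>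
        let m' := if p.2 > s.2 then p.2 else s.2
        ((if m' == p.1 then s.1 + 1 else s.1), m')) (c, m)).1 = c + pvFA t i m := by
  intro t
  induction t with
  | nil => intro i m c; simp [pvFA, PySem.List.enumerate_nil]
  | cons x t ih =>
    intro i m c
    rw [PySem.List.enumerate_cons]
    simp only [List.foldl_cons]
    rw [pvIteMax, ih, pvFA]
    by_cases h : max m x = i
    · simp [h]; omega
    · simp [h]

-- B's record-building fold appends pvRecs after any nonempty accumulator
lemma pvRecsBuild : ∀ (e : List (Int × Int)) (rs : List (Int × Int)) (l : Int × Int),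
    rs.getLast? = some l →
    (e.foldl (fun (rs : List (Int × Int)) p =>
        match rs.getLast? with
        | none => rs ++ [(p.2, p.1)]
        | some l => if p.2 > l.1 then rs ++ [(p.2, p.1)] else rs) rs)
      = rs ++ pvRecs l.1 e := by
  intro e
  induction e with
  | nil => intro rs l _; simp [pvRecs]
  | cons p t ih =>
    intro rs l hl
    simp only [List.foldl_cons, hl]
    obtain ⟨i, x⟩ := p
    by_cases h : x > l.1
    · have := ih (rs ++ [(x, i)]) (x, i) (by simp)
      simp [pvRecs, h, this]
    · have := ih rs l hl
      simp [pvRecs, h, this]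

-- B's zip counting fold computes pvCnt
lemma pvZipCnt : ∀ (rs : List (Int × Int)) (n c : Int),
    ((rs.zip ((rs.drop 1).map (fun r => r.2) ++ [n])).foldl
      (fun (c : Int) pq => if pq.1.2 ≤ pq.1.1 ∧ pq.1.1 < pq.2 then c + 1 else c) c)
      = c + pvCnt rs n := by
  intro rs
  induction rs with
  | nil => intro n c; simp [pvCnt]
  | cons r rest ih =>
    intro n c
    obtain ⟨v, p⟩ := r
    cases rest with
    | nil => simp [pvCnt]; by_cases h : p ≤ v ∧ v < n <;> simp [h]
    | cons r2 rest2 =>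
      obtain ⟨v2, p2⟩ := r2
      have ih' := ih n (if p ≤ v ∧ v < p2 then c + 1 else c)
      simp only [List.drop_succ_cons, List.drop_zero] at ih'
      simp only [List.drop_succ_cons, List.drop_zero, List.map_cons, List.cons_append,
        List.zip_cons_cons, List.foldl_cons]
      rw [ih']
      simp only [pvCnt]
      by_cases h : p ≤ v ∧ v < p2 <;> simp [h] <;> try ring
-- core invariant: A's remaining count plus the pending membership test for the open record (m, p)
-- equals B's record count with (m, p) prepended
lemma pvMain : ∀ (t : List Int) (i m p : Int), p ≤ i →
    (if p ≤ m ∧ m < i then 1 else 0) + pvFA t i m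
      = pvCnt ((m, p) :: pvRecs m (PySem.List.enumerate t i)) (i + t.length) := by
  intro t
  induction t with
  | nil =>
    intro i m p _
    simp [pvFA, pvCnt, pvRecs, PySem.List.enumerate_nil]
  | cons x t ih =>
    intro i m p hpi
    rw [PySem.List.enumerate_cons]
    have hlen : i + (((x :: t).length : Nat) : Int) = (i + 1) + (t.length : Int) := by
      simp only [List.length_cons]; push_cast; ring
    rw [hlen]
    by_cases h : x > m
    · have hmx : max m x = x := max_eq_right (le_of_lt h)
      have hrec : pvRecs m ((i, x) :: PySem.List.enumerate t (i + 1))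
          = (x, i) :: pvRecs x (PySem.List.enumerate t (i + 1)) := by
        simp [pvRecs, h]
      rw [hrec]
      have hIH := ih (i + 1) x i (by omega)
      have hcnt : pvCnt ((m, p) :: (x, i) :: pvRecs x (PySem.List.enumerate t (i + 1)))
            ((i + 1) + (t.length : Int))
          = (if p ≤ m ∧ m < i then 1 else 0)
            + pvCnt ((x, i) :: pvRecs x (PySem.List.enumerate t (i + 1)))
                ((i + 1) + (t.length : Int)) := by
        simp [pvCnt]
      rw [hcnt, ← hIH]
      simp only [pvFA, hmx]
      have hxi : (if x = i then (1 : Int) else 0) = (if i ≤ x ∧ x < i + 1 then 1 else 0) := by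
        split_ifs <;> omega
      rw [hxi]
    · have hmx : max m x = m := max_eq_left (not_lt.mp h)
      have hrec : pvRecs m ((i, x) :: PySem.List.enumerate t (i + 1))
          = pvRecs m (PySem.List.enumerate t (i + 1)) := by
        simp [pvRecs, h]
      rw [hrec]
      have hIH := ih (i + 1) m p (by omega)
      rw [← hIH]
      simp only [pvFA, hmx]
      have hsplit : (if p ≤ m ∧ m < i then (1 : Int) else 0) + (if m = i then (1 : Int) else 0)
          = (if p ≤ m ∧ m < i + 1 then (1 : Int) else 0) := by
        split_ifs <;> omega
      rw [← hsplit]; ring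

-- ===== VERDICT (by name: the statements are the Claim_ definitions above) =====
theorem divideBlock_spec : Claim_equal_divideBlock := by
  intro numlst _ hpre
  unfold Spec_divideBlock divideBlock divideBlock_alt
  obtain ⟨x, t, rfl⟩ : ∃ x t, numlst = x :: t := by
    cases numlst with
    | nil => exact absurd rfl hpre
    | cons a b => exact ⟨a, b, rfl⟩
  dsimp only
  have h0 : PySem.List.pyGetD (x :: t) 0 0 = x := by simp [pysem]
  -- A side
  have hrange := pvRangeFold
    (fun (s : Int × Int) (i : Int) (xv : Int) =>
      ((if (if xv > s.2 then xv else s.2) == i then s.1 + 1 else s.1),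
       if xv > s.2 then xv else s.2)) (x :: t) (x :: t) 0 rfl (0, PySem.List.pyGetD (x :: t) 0 0)
  simp only [Nat.cast_zero, zero_add] at hrange
  rw [h0] at hrange ⊢
  rw [hrange]
  have hA := pvFoldFA (x :: t) 0 x 0
  simp only [zero_add] at hA
  rw [hA]
  -- B side: records of x :: t are (x,0) followed by the records of the tail
  have hrec : ((PySem.List.enumerate (x :: t) 0).foldl
      (fun (rs : List (Int × Int)) p =>
        match rs.getLast? with
        | none => rs ++ [(p.2, p.1)]
        | some l => if p.2 > l.1 then rs ++ [(p.2, p.1)] else rs) [])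
      = (x, 0) :: pvRecs x (PySem.List.enumerate t 1) := by
    rw [PySem.List.enumerate_cons]
    simp only [List.foldl_cons, List.getLast?_nil, List.nil_append]
    have := pvRecsBuild (PySem.List.enumerate t (0 + 1)) [(x, 0)] (x, 0) (by simp)
    simpa using this
  rw [hrec, pvZipCnt]
  simp only [zero_add]
  -- combine via the core invariant at i = 1, pending record (x, 0)
  have hmain := pvMain t 1 x 0 (by omega)
  have hfa : pvFA (x :: t) 0 x = (if 0 ≤ x ∧ x < 1 then 1 else 0) + pvFA t 1 x := by
    simp only [pvFA, max_self, zero_add]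
    have hx0 : (if x = (0 : Int) then (1 : Int) else 0) = (if (0 : Int) ≤ x ∧ x < 1 then 1 else 0) := by
      split_ifs <;> omega
    rw [hx0]
  rw [hfa, hmain]
  have : ((x :: t).length : Int) = 1 + (t.length : Int) := by simp; ring
  rw [this]
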